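-- pv_equiv track=rewrite | github.com/HananAlradadi/coder-hub-python-challenges | leetVowels.py | first_n_vowels
-- ===== SOURCE A (Python) =====
-- def first_n_vowels(phrase: str, n: int) -> str:
--     Vowels = ""
--     leetVowels = ['u','o','i','e','a']
--     lenLv = 0
--     for i in range (len(phrase)):
--         if phrase[i].lower() in leetVowels :
--           Vowels = Vowels + phrase[i]
--           lenLv = lenLv +1
--           if lenLv == n :
--             return Vowels
--     return 'invalid'
-- ===== SOURCE B (Python) =====
-- def first_n_vowels(phrase: str, n: int) -> str:
--     collected = [c for c in phrase if c.lower() in set('aeiou')]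
--     if 1 <= n <= len(collected):
--         return ''.join(collected[:n])
--     return 'invalid'
-- ===== Notes on version B (the rewrite author's own statement) =====
-- stated objective: simpler
-- what changed: Replaces the counter-driven early-exit indexing loop with a gather-then-slice decomposition: one filter over the characters, then a single bounds check and slice.
import Mathlib
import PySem

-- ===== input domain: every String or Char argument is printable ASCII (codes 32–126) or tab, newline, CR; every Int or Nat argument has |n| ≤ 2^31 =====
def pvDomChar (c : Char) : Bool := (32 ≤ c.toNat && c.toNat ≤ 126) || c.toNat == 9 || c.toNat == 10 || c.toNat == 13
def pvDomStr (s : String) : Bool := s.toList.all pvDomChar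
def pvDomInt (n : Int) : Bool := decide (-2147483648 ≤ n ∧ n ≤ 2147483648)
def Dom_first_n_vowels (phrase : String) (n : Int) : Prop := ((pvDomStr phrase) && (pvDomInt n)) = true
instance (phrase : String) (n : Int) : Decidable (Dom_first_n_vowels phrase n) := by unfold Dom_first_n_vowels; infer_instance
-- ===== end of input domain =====

-- B replaces A's counter-driven early-exit loop with gather-then-slice (filter all vowels, then one bounds check and a slice); objective: simpler.

-- ===== PORT A =====
-- A's loop over phrase[i]: structural recursion over the character list, carrying the
-- collected vowels (Vowels, as a List Char turned into a String exactly at the returns)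
-- and the counter lenLv; early return when the counter reaches n.
def pvGoA (n : Int) : List Char → List Char → Int → String
  | [], _, _ => "invalid"
  | c :: rest, acc, cnt =>
      if PySem.Chars.lowerChar c ∈ ['u','o','i','e','a'] then
        if cnt + 1 == n then String.ofList (acc ++ [c])
        else pvGoA n rest (acc ++ [c]) (cnt + 1)
      else pvGoA n rest acc cnt

def first_n_vowels (phrase : String) (n : Int) : String :=
  pvGoA n phrase.toList [] 0

-- ===== PORT B =====
def first_n_vowels_alt (phrase : String) (n : Int) : String :=
  let collected := phrase.toList.filter (fun c => PySem.Chars.lowerChar c ∈ ['a','e','i','o','u'])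
  if 1 ≤ n ∧ n ≤ (collected.length : Int) then String.ofList (collected.take n.toNat)
  else "invalid"

-- ===== PRECONDITION & SPEC =====
def Spec_first_n_vowels (phrase : String) (n : Int) (out : String) : Prop := out = first_n_vowels_alt phrase n
instance (phrase : String) (n : Int) (out : String) : Decidable (Spec_first_n_vowels phrase n out) := by unfold Spec_first_n_vowels; infer_instance

-- ===== CLAIM (what is proved, stated in full; the proofs are below) =====
def Claim_equal_first_n_vowels : Prop := ∀ (phrase : String) (n : Int), Dom_first_n_vowels phrase n → Spec_first_n_vowels phrase n (first_n_vowels phrase n)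

-- ===== LEMMAS AND PROOFS =====

theorem pvVowel_iff (c : Char) :
    (PySem.Chars.lowerChar c ∈ ['u','o','i','e','a']) ↔ (PySem.Chars.lowerChar c ∈ ['a','e','i','o','u']) := by
  simp; tauto

theorem pvGoA_eq (n : Int) (l acc : List Char) (cnt : Int) :
    pvGoA n l acc cnt =
      (if cnt < n ∧ n - cnt ≤ ((l.filter (fun c => PySem.Chars.lowerChar c ∈ ['a','e','i','o','u'])).length : Int)
       then String.ofList (acc ++ (l.filter (fun c => PySem.Chars.lowerChar c ∈ ['a','e','i','o','u'])).take (n - cnt).toNat)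
       else "invalid") := by
  induction l generalizing acc cnt with
  | nil =>
      rw [pvGoA, List.filter_nil, if_neg]
      simp only [List.length_nil]
      omega
  | cons c rest ih =>
      by_cases hv : PySem.Chars.lowerChar c ∈ ['a','e','i','o','u']
      · have hv' : PySem.Chars.lowerChar c ∈ ['u','o','i','e','a'] := (pvVowel_iff c).mpr hv
        have hfilt : List.filter (fun c => decide (PySem.Chars.lowerChar c ∈ ['a','e','i','o','u'])) (c :: rest)
            = c :: List.filter (fun c => decide (PySem.Chars.lowerChar c ∈ ['a','e','i','o','u'])) rest :=
          List.filter_cons_of_pos (by simpa using hv)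
        rw [pvGoA, if_pos hv', hfilt]
        by_cases he : cnt + 1 = n
        · rw [if_pos (by simp [he]), if_pos ⟨by omega, by rw [List.length_cons]; push_cast; omega⟩]
          have ht : (n - cnt).toNat = 1 := by omega
          rw [ht, List.take_succ_cons, List.take_zero]
        · rw [if_neg (by simp [he]), ih]
          by_cases hc : cnt + 1 < n ∧ n - (cnt + 1) ≤ ((List.filter (fun c => decide (PySem.Chars.lowerChar c ∈ ['a','e','i','o','u'])) rest).length : Int)
          · rw [if_pos hc, if_pos ⟨by omega, by rw [List.length_cons]; push_cast at hc ⊢; omega⟩]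
            have ht : (n - cnt).toNat = (n - (cnt + 1)).toNat + 1 := by omega
            rw [ht, List.take_succ_cons, List.append_assoc, List.singleton_append]
          · rw [if_neg hc, if_neg (by rw [List.length_cons]; push_cast at hc ⊢; omega)]
      · have hv' : PySem.Chars.lowerChar c ∉ ['u','o','i','e','a'] := fun h => hv ((pvVowel_iff c).mp h)
        have hfilt : List.filter (fun c => decide (PySem.Chars.lowerChar c ∈ ['a','e','i','o','u'])) (c :: rest)
            = List.filter (fun c => decide (PySem.Chars.lowerChar c ∈ ['a','e','i','o','u'])) rest :=
          List.filter_cons_of_neg (by simpa using hv)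
        rw [pvGoA, if_neg hv', hfilt, ih]

-- ===== VERDICT (by name: the statement is the Claim_ definition above) =====
theorem first_n_vowels_spec : Claim_equal_first_n_vowels := by
  intro phrase n _
  unfold Spec_first_n_vowels first_n_vowels first_n_vowels_alt
  rw [pvGoA_eq]
  simp only [List.nil_append, Int.sub_zero]
  by_cases h : 1 ≤ n ∧ n ≤ ((phrase.toList.filter (fun c => PySem.Chars.lowerChar c ∈ ['a','e','i','o','u'])).length : Int)
  · rw [if_pos (by omega), if_pos h]
  · rw [if_neg (by omega), if_neg h]
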